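-- pv_equiv track=rewrite | github.com/Remiing/Baekjoon | silver/11497.py | calc
-- ===== SOURCE A (Python) =====
-- def calc(array):
--     array.sort()
--     array = array[::2][::-1] + array[1::2]
--     dif_max = abs(array[0] - array[-1])
--     for i in range(len(array)-1):
--         dif = abs(array[i+1] - array[i])
--         if dif > dif_max:
--             dif_max = dif
--     return dif_max
-- ===== SOURCE B (Python) =====
-- def calc(array):
--     array.sort()
--     if len(array) == 1:
--         return 0
--     if len(array) == 2:
--         return array[1] - array[0]
--     return max(c - a for a, c in zip(array, array[2:]))
-- ===== Notes on version B (the rewrite author's own statement) =====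
-- stated objective: simpler
-- what changed: B never builds the zig-zag arrangement: after sorting it returns the maximum two-apart gap max(s[i+2]-s[i]) in one zip pass (n<=2 special-cased), which provably equals the max adjacent difference of A's circular arrangement.
import Mathlib
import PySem

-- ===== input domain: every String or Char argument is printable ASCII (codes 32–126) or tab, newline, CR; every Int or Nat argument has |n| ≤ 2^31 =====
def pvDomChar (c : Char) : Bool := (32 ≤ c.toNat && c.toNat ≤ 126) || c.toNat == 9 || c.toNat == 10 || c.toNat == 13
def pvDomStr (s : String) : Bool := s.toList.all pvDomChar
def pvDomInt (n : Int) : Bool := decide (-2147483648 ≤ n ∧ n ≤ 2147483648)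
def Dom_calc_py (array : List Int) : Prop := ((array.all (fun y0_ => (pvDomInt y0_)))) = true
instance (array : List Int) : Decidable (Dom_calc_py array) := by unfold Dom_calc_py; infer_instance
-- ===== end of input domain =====

-- B avoids building A's zig-zag arrangement: after sorting it returns the maximum two-apart
-- gap in one pass (n ≤ 2 special-cased); equal to A's circular max adjacent difference.
-- Both Pythons sort the caller's list in place; the equivalence proved here is about the return value.

-- ===== PORT A =====
-- 'array[::2]' / 'array[1::2]' / '[::-1]' are slice? with step 2 / 2 / -1; the step literals are
-- nonzero, so slice? is always `some` and '.getD []' is exact (no Python exception there).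
def calc_py (array : List Int) : Int :=
  let s := PySem.List.sorted array (fun x => x) false
  let arr := ((PySem.List.slice? ((PySem.List.slice? s none none 2).getD []) none none (-1)).getD [])
             ++ (PySem.List.slice? s (some 1) none 2).getD []
  let difMax0 := |PySem.List.pyGetD arr 0 0 - PySem.List.pyGetD arr (-1) 0|
  (PySem.List.pyRange 0 ((arr.length : Int) - 1) 1).foldl
    (fun difMax i =>
      let dif := |PySem.List.pyGetD arr (i + 1) 0 - PySem.List.pyGetD arr i 0|
      if dif > difMax then dif else difMax) difMax0

-- ===== PORT B =====
-- 'max(c - a for a, c in zip(array, array[2:]))'; the [] branch is Python's ValueError on an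
-- empty generator, reached only for array = [], which Pre_ excludes.
def calc_py_alt (array : List Int) : Int :=
  let s := PySem.List.sorted array (fun x => x) false
  if s.length = 1 then 0
  else if s.length = 2 then PySem.List.pyGetD s 1 0 - PySem.List.pyGetD s 0 0
  else
    match List.zipWith (fun a c => c - a) s (s.drop 2) with
    | [] => 0
    | d :: ds => ds.foldl max d

-- ===== PRECONDITION & SPEC =====
-- Pre_ excludes only the empty list, on which A raises IndexError (array[0]).
def Pre_calc_py (array : List Int) : Prop := array ≠ []
instance (array : List Int) : Decidable (Pre_calc_py array) := by unfold Pre_calc_py; infer_instance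
def pvWitness_calc_py : List Int := [3, 1, 2]

def Spec_calc_py (array : List Int) (out : Int) : Prop := out = calc_py_alt array
instance (array : List Int) (out : Int) : Decidable (Spec_calc_py array out) := by unfold Spec_calc_py; infer_instance

-- ===== CLAIM (what is proved, stated in full; the proofs are below) =====
def Claim_equal_calc_py : Prop := ∀ (array : List Int), Dom_calc_py array → Pre_calc_py array → Spec_calc_py array (calc_py array)

-- ===== LEMMAS AND PROOFS =====


-- helper: Python's in-place running max 'if dif > dif_max: dif_max = dif'
theorem pv_foldl_if_eq_max (L : List Int) (d : Int) :
    L.foldl (fun dm x => if x > dm then x else dm) d = L.foldl max d := by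
  induction L generalizing d with
  | nil => rfl
  | cons a t ih =>
    simp only [List.foldl_cons]
    rw [ih]
    congr 1
    rw [max_def]
    split_ifs <;> omega

theorem pv_foldl_max_le (t : List Int) (a c : Int) (ha : a ≤ c) (ht : ∀ y ∈ t, y ≤ c) :
    t.foldl max a ≤ c := by
  rcases PySem.List.foldl_max_mem t a with h | h
  · rw [h]; exact ha
  · exact ht _ h

theorem pv_absdiff_eq (a b : Int) (h : a ≤ b) : |a - b| = b - a := by
  rw [abs_sub_comm, abs_of_nonneg (by omega)]

theorem pv_filterMap_range_get (xs : List Int) (idx : Nat → Nat) (m : Nat)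
    (h : ∀ k < m, idx k < xs.length) :
    (List.range m).filterMap (fun k => xs[idx k]?) = (List.range m).map (fun k => xs.getD (idx k) 0) := by
  induction m with
  | zero => simp
  | succ m ih =>
    rw [List.range_succ, List.filterMap_append, List.map_append,
        ih (fun k hk => h k (by omega))]
    simp [List.getD_eq_getElem?_getD, List.getElem?_eq_getElem (h m (by omega))]

-- array[::2] is the even-index elements
theorem pv_slice_even (s : List Int) :
    (PySem.List.slice? s none none 2).getD [] =
      (List.range ((s.length + 1) / 2)).map (fun k => s.getD (2 * k) 0) := by
  simp only [PySem.List.slice?, PySem.List.sliceIndices]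
  norm_num
  have hc : (if 0 < s.length then (((s.length : Int) + 2 - 1) / 2).toNat else 0)
      = (s.length + 1) / 2 := by split_ifs with h <;> omega
  rw [hc, pv_filterMap_range_get s (fun k => ((2 : Int) * k).toNat) _
        (fun k hk => by show ((2 : Int) * k).toNat < s.length; omega)]
  apply List.map_congr_left
  intro k hk
  have h2 : ((2 : Int) * k).toNat = 2 * k := by omega
  simp [List.getD_eq_getElem?_getD, h2]

-- array[1::2] is the odd-index elements
theorem pv_slice_odd (s : List Int) :
    (PySem.List.slice? s (some 1) none 2).getD [] =
      (List.range (s.length / 2)).map (fun k => s.getD (2 * k + 1) 0) := by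
  match s with
  | [] => decide
  | a :: t =>
    simp only [PySem.List.slice?, PySem.List.sliceIndices]
    norm_num
    have hc : (if 0 < t.length then (((t.length : Int) + 2 - 1) / 2).toNat else 0)
        = (t.length + 1) / 2 := by split_ifs with h <;> omega
    rw [hc, pv_filterMap_range_get (a :: t) (fun k => ((1 : Int) + 2 * k).toNat) _
          (fun k hk => by show ((1 : Int) + 2 * k).toNat < (a :: t).length; simp; omega)]
    apply List.map_congr_left
    intro k hk
    have h2 : ((1 : Int) + 2 * k).toNat = 2 * k + 1 := by omega
    simp [List.getD_eq_getElem?_getD, h2]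

-- A's zig-zag arrangement of the sorted list
def pvArr (s : List Int) : List Int :=
  ((List.range ((s.length + 1) / 2)).map (fun k => s.getD (2 * k) 0)).reverse
    ++ (List.range (s.length / 2)).map (fun k => s.getD (2 * k + 1) 0)

theorem pvArr_length (s : List Int) : (pvArr s).length = s.length := by
  simp [pvArr]; omega

theorem pvArr_getD (s : List Int) (i : Nat) (hi : i < s.length) :
    (pvArr s).getD i 0 =
      if i < (s.length + 1) / 2 then s.getD (2 * ((s.length + 1) / 2 - 1 - i)) 0
      else s.getD (2 * (i - (s.length + 1) / 2) + 1) 0 := by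
  unfold pvArr
  set m := (s.length + 1) / 2 with hm
  split_ifs with h
  · rw [List.getD_append _ _ _ _ (by simp; omega)]
    rw [List.getD_eq_getElem _ _ (by simp; omega)]
    rw [List.getElem_reverse]
    simp
  · rw [List.getD_append_right _ _ _ _ (by simp; omega)]
    rw [List.getD_eq_getElem _ _ (by simp; omega)]
    simp

theorem pv_calc_py_eq (array : List Int) (hne0 : array ≠ []) :
    calc_py array =
      ((List.range ((PySem.List.sorted array (fun x => x) false).length - 1)).map
          (fun i => |(pvArr (PySem.List.sorted array (fun x => x) false)).getD (i + 1) 0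
                     - (pvArr (PySem.List.sorted array (fun x => x) false)).getD i 0|)).foldl max
        |(pvArr (PySem.List.sorted array (fun x => x) false)).getD 0 0
          - (pvArr (PySem.List.sorted array (fun x => x) false)).getD
              ((PySem.List.sorted array (fun x => x) false).length - 1) 0| := by
  unfold calc_py
  set s := PySem.List.sorted array (fun x => x) false with hs
  have hsne : s ≠ [] := by
    rw [hs, Ne, PySem.List.sorted_eq_nil_iff]; exact hne0
  have hn : 0 < s.length := List.length_pos_iff.mpr hsne
  simp only [pv_slice_even, pv_slice_odd, PySem.List.slice?_none_none_neg_one, Option.getD_some]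
  rw [show (((List.range ((s.length + 1) / 2)).map (fun k => s.getD (2 * k) 0)).reverse
      ++ (List.range (s.length / 2)).map (fun k => s.getD (2 * k + 1) 0)) = pvArr s from rfl]
  have hlen : (pvArr s).length = s.length := pvArr_length s
  have hd0 : PySem.List.pyGetD (pvArr s) (-1) 0 = (pvArr s).getD (s.length - 1) 0 := by
    rw [PySem.List.pyGetD_neg_ofNat (pvArr s) 1 0 (by omega) (by omega)]
    rw [List.getD_eq_getElem _ _ (by omega)]
    congr 1
    omega
  rw [hd0]
  rw [show ((pvArr s).length : Int) - 1 = ((s.length - 1 : Nat) : Int) by rw [hlen]; omega]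
  rw [PySem.List.pyRange_one]
  rw [List.foldl_map, PySem.List.pyGetD_zero]
  simp only [show ((s.length - 1 : Nat) : Int) - 0 = ((s.length - 1 : Nat) : Int) by ring,
    Int.toNat_natCast]
  rw [← pv_foldl_if_eq_max ((List.range (s.length - 1)).map
        (fun i => |(pvArr s).getD (i + 1) 0 - (pvArr s).getD i 0|)) _, List.foldl_map]
  apply PySem.List.foldl_congr_mem
  intro acc k _
  simp only [zero_add]
  have h1 : ((k : Int) + 1) = ((k + 1 : Nat) : Int) := by push_cast; ring
  rw [h1, PySem.List.pyGetD_natCast, PySem.List.pyGetD_natCast]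

theorem pv_main3 (s : List Int) (hpw : List.Pairwise (fun a b : Int => a ≤ b) s)
    (h3 : 3 ≤ s.length) :
    ((List.range (s.length - 1)).map
        (fun i => |(pvArr s).getD (i + 1) 0 - (pvArr s).getD i 0|)).foldl max
      |(pvArr s).getD 0 0 - (pvArr s).getD (s.length - 1) 0|
    = (match List.zipWith (fun a c : Int => c - a) s (s.drop 2) with
       | [] => (0 : Int)
       | d :: ds => ds.foldl max d) := by
  set n := s.length with hn
  set m := (n + 1) / 2 with hm
  have hmono : ∀ p q : Nat, p ≤ q → q < n → s.getD p 0 ≤ s.getD q 0 := by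
    intro p q hpq hq
    rcases Nat.eq_or_lt_of_le hpq with rfl | hlt
    · exact le_refl _
    · rw [List.getD_eq_getElem _ _ (by omega), List.getD_eq_getElem _ _ (by omega)]
      exact List.pairwise_iff_getElem.mp hpw p q (by omega) (by omega) hlt
  have harr : ∀ i, i < n → (pvArr s).getD i 0 =
      if i < m then s.getD (2 * (m - 1 - i)) 0 else s.getD (2 * (i - m) + 1) 0 :=
    fun i hi => pvArr_getD s i hi
  have hZWlen : (List.zipWith (fun a c : Int => c - a) s (s.drop 2)).length = n - 2 := by
    rw [List.length_zipWith]; simp; omega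
  have hZWget : ∀ (k : Nat), k < n - 2 →
      (List.zipWith (fun a c : Int => c - a) s (s.drop 2)).getD k 0
        = s.getD (k + 2) 0 - s.getD k 0 := by
    intro k hk
    rw [List.getD_eq_getElem _ _ (by omega)]
    rw [List.getElem_zipWith, List.getElem_drop]
    rw [List.getD_eq_getElem _ _ (by omega), List.getD_eq_getElem _ _ (by omega)]
    congr 2
    omega
  obtain ⟨d, ds, hds⟩ : ∃ d ds, List.zipWith (fun a c : Int => c - a) s (s.drop 2) = d :: ds := by
    cases hzw : List.zipWith (fun a c : Int => c - a) s (s.drop 2) with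
    | nil => rw [hzw] at hZWlen; simp at hZWlen; omega
    | cons a t => exact ⟨a, t, rfl⟩
  rw [hds]
  show _ = ds.foldl max d
  have hgapB : ∀ k, k < n - 2 → s.getD (k + 2) 0 - s.getD k 0 ≤ ds.foldl max d := by
    intro k hk
    rw [← hZWget k hk, hds]
    have hmem : (d :: ds).getD k 0 ∈ d :: ds := by
      rw [List.getD_eq_getElem _ _ (by rw [← hds, hZWlen]; omega)]
      exact List.getElem_mem _
    rcases List.mem_cons.mp hmem with h | h
    · rw [h]; exact (PySem.List.le_foldl_max ds d).1
    · exact (PySem.List.le_foldl_max ds d).2 _ h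
  have hd_eq : d = s.getD 2 0 - s.getD 0 0 := by
    have h0 := hZWget 0 (by omega)
    rw [hds] at h0
    simpa using h0
  have hgapA : ∀ k, k < n - 2 → s.getD (k + 2) 0 - s.getD k 0 ≤
      ((List.range (n - 1)).map
        (fun i => |(pvArr s).getD (i + 1) 0 - (pvArr s).getD i 0|)).foldl max
        |(pvArr s).getD 0 0 - (pvArr s).getD (n - 1) 0| := by
    intro k hk
    by_cases hpar : k % 2 = 0
    · have hval : |(pvArr s).getD (m - 2 - k / 2 + 1) 0 - (pvArr s).getD (m - 2 - k / 2) 0|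
          = s.getD (k + 2) 0 - s.getD k 0 := by
        rw [harr _ (by omega), harr _ (by omega), if_pos (by omega : m - 2 - k / 2 + 1 < m),
            if_pos (by omega : m - 2 - k / 2 < m)]
        rw [show 2 * (m - 1 - (m - 2 - k / 2 + 1)) = k from by omega,
            show 2 * (m - 1 - (m - 2 - k / 2)) = k + 2 from by omega]
        exact pv_absdiff_eq _ _ (hmono k (k + 2) (by omega) (by omega))
      rw [← hval]
      exact (PySem.List.le_foldl_max _ _).2 _
        (List.mem_map.mpr ⟨m - 2 - k / 2, List.mem_range.mpr (by omega), rfl⟩)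
    · have hval : |(pvArr s).getD (m + k / 2 + 1) 0 - (pvArr s).getD (m + k / 2) 0|
          = s.getD (k + 2) 0 - s.getD k 0 := by
        rw [harr _ (by omega), harr _ (by omega), if_neg (by omega : ¬ (m + k / 2 + 1 < m)),
            if_neg (by omega : ¬ (m + k / 2 < m))]
        rw [show 2 * (m + k / 2 + 1 - m) + 1 = k + 2 from by omega,
            show 2 * (m + k / 2 - m) + 1 = k from by omega]
        rw [abs_sub_comm]
        exact pv_absdiff_eq _ _ (hmono k (k + 2) (by omega) (by omega))
      rw [← hval]
      exact (PySem.List.le_foldl_max _ _).2 _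
        (List.mem_map.mpr ⟨m + k / 2, List.mem_range.mpr (by omega), rfl⟩)
  apply le_antisymm
  · apply pv_foldl_max_le
    · -- d0 = |arr[0] - arr[n-1]| ≤ Bval
      rw [harr 0 (by omega), harr (n - 1) (by omega), if_pos (by omega : 0 < m),
          if_neg (by omega : ¬ (n - 1 < m))]
      have hb := hgapB (n - 3) (by omega)
      rw [show n - 3 + 2 = n - 1 from by omega] at hb
      have hm1 : s.getD (n - 3) 0 ≤ s.getD (n - 2) 0 := hmono _ _ (by omega) (by omega)
      by_cases hpar : n % 2 = 0
      · rw [show 2 * (m - 1 - 0) = n - 2 from by omega,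
            show 2 * (n - 1 - m) + 1 = n - 1 from by omega]
        rw [pv_absdiff_eq _ _ (hmono (n - 2) (n - 1) (by omega) (by omega))]
        omega
      · rw [show 2 * (m - 1 - 0) = n - 1 from by omega,
            show 2 * (n - 1 - m) + 1 = n - 2 from by omega]
        rw [abs_sub_comm, pv_absdiff_eq _ _ (hmono (n - 2) (n - 1) (by omega) (by omega))]
        omega
    · intro y hy
      obtain ⟨i, hi, rfl⟩ := List.mem_map.mp hy
      rw [List.mem_range] at hi
      by_cases hc1 : i + 1 < m
      · rw [harr i (by omega), harr (i + 1) (by omega), if_pos (by omega : i < m), if_pos hc1]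
        rw [pv_absdiff_eq _ _ (hmono _ _ (by omega) (by omega))]
        have hb := hgapB (2 * (m - 1 - (i + 1))) (by omega)
        rw [show 2 * (m - 1 - (i + 1)) + 2 = 2 * (m - 1 - i) from by omega] at hb
        exact hb
      · by_cases hc2 : i < m
        · -- junction: i = m - 1
          rw [harr i (by omega), harr (i + 1) (by omega), if_pos hc2, if_neg hc1]
          rw [show 2 * (i + 1 - m) + 1 = 1 from by omega,
              show 2 * (m - 1 - i) = 0 from by omega]
          rw [abs_sub_comm, pv_absdiff_eq _ _ (hmono 0 1 (by omega) (by omega))]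
          have hb := hgapB 0 (by omega)
          have h12 : s.getD 1 0 ≤ s.getD 2 0 := hmono 1 2 (by omega) (by omega)
          simp only [Nat.zero_add] at hb
          omega
        · rw [harr i (by omega), harr (i + 1) (by omega), if_neg hc2, if_neg hc1]
          rw [abs_sub_comm, pv_absdiff_eq _ _ (hmono _ _ (by omega) (by omega))]
          have hb := hgapB (2 * (i - m) + 1) (by omega)
          rw [show 2 * (i - m) + 1 + 2 = 2 * (i + 1 - m) + 1 from by omega] at hb
          exact hb
  · apply pv_foldl_max_le
    · rw [hd_eq]
      have := hgapA 0 (by omega)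
      simpa using this
    · intro y hy
      have hyZ : y ∈ List.zipWith (fun a c : Int => c - a) s (s.drop 2) := by
        rw [hds]; exact List.mem_cons_of_mem d hy
      obtain ⟨k, hk, hval⟩ := List.mem_iff_getElem.mp hyZ
      rw [hZWlen] at hk
      have := hZWget k hk
      rw [List.getD_eq_getElem _ _ (by omega)] at this
      rw [← hval, this]
      exact hgapA k hk

theorem calc_py_spec_main : ∀ (array : List Int), array ≠ [] → calc_py array = calc_py_alt array := by
  intro array hne0
  rw [pv_calc_py_eq array hne0]
  simp only [calc_py_alt]
  set s := PySem.List.sorted array (fun x => x) false with hs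
  have hsne : s ≠ [] := by rw [hs, Ne, PySem.List.sorted_eq_nil_iff]; exact hne0
  have hn : 0 < s.length := List.length_pos_iff.mpr hsne
  have hpw : List.Pairwise (fun a b : Int => a ≤ b) s := by
    rw [hs]; exact PySem.List.sorted_pairwise array (fun x => x)
  by_cases h1 : s.length = 1
  · rw [if_pos h1]
    simp [h1]
  · rw [if_neg h1]
    by_cases h2 : s.length = 2
    · rw [if_pos h2]
      have harr := pvArr_getD s
      have ha0 : (pvArr s).getD 0 0 = s.getD 0 0 := by
        rw [harr 0 (by omega), if_pos (by omega)]
        congr 1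
        omega
      have ha1 : (pvArr s).getD 1 0 = s.getD 1 0 := by
        rw [harr 1 (by omega), if_neg (by omega)]
        congr 1
        omega
      rw [show s.length - 1 = 1 from by omega]
      simp only [List.range_one, List.map_cons, List.map_nil, List.foldl_cons, List.foldl_nil]
      rw [ha0, ha1]
      have h01 : s.getD 0 0 ≤ s.getD 1 0 := by
        rw [List.getD_eq_getElem _ _ (by omega), List.getD_eq_getElem _ _ (by omega)]
        exact List.pairwise_iff_getElem.mp hpw 0 1 (by omega) (by omega) (by omega)
      rw [pv_absdiff_eq _ _ h01, abs_sub_comm, pv_absdiff_eq _ _ h01]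
      rw [PySem.List.pyGetD_zero]
      rw [show (1 : Int) = ((1 : Nat) : Int) from rfl, PySem.List.pyGetD_natCast]
      simp
    · rw [if_neg h2]
      exact pv_main3 s hpw (by omega)

-- ===== VERDICT (by name: the statement is the Claim_ definition above) =====
theorem calc_py_spec : Claim_equal_calc_py := by
  intro array _ hpre
  exact calc_py_spec_main array hpre
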